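-- pv_equiv track=rewrite | github.com/LeonardoAgasso/Ohnomirna_review | local/bin/outAligFastab.py | findDist
-- ===== SOURCE A (Python) =====
-- def findDist(word1, word2, symbols):
--
-- 	# seq1 and seq2 have the same length, check the first index such that seq1[i] = seq2[i]
-- 	for i, (char1, char2) in enumerate(zip(word1, word2)):
-- 		if char1 == char2:
-- 			index1 = i
--
-- 	# check the index such that the string symbols[index] = "|"
-- 	for i, char in enumerate(symbols):
-- 		if char == "|":
-- 			index2 = i
--
-- 	# return the distance between the two indexes
-- 	return index1 - index2
-- ===== SOURCE B (Python) =====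
-- def findDist(word1, word2, symbols):
--     # scan backwards and stop at the first (i.e. last) matching position
--     for i in range(min(len(word1), len(word2)) - 1, -1, -1):
--         if word1[i] == word2[i]:
--             index1 = i
--             break
--     # scan backwards for the last '|'
--     for i in range(len(symbols) - 1, -1, -1):
--         if symbols[i] == "|":
--             index2 = i
--             break
--     return index1 - index2
-- ===== Notes on version B (the rewrite author's own statement) =====
-- stated objective: alternative
-- what changed: B scans each string backwards and stops at the first hit (the last match), instead of A's full forward scans that keep overwriting the index.
import Mathlib
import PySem

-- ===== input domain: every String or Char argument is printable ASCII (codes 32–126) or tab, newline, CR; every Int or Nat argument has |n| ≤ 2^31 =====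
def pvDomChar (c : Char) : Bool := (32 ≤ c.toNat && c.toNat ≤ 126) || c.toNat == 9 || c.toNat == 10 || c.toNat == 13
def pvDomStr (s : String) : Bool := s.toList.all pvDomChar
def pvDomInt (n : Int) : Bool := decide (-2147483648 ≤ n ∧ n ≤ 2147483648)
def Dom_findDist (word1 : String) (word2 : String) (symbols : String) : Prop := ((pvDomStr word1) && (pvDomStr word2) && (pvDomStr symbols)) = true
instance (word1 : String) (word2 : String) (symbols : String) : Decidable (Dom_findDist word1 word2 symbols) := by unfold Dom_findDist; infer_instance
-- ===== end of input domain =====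

-- B scans backwards with early exit instead of A's full forward overwrite scans; same value everywhere (both raise outside Pre_).

-- ===== PORT A =====
-- A: forward scan over enumerate(zip(word1,word2)) keeping the LAST matching index, same for '|';
-- when a loop never assigns its index Python raises UnboundLocalError — those inputs are excluded by Pre_.
def findDist (word1 : String) (word2 : String) (symbols : String) : Int :=
  let index1 : Option Int :=
    (PySem.List.enumerate (word1.toList.zip word2.toList) 0).foldl
      (fun acc p => if p.2.1 == p.2.2 then some p.1 else acc) none
  let index2 : Option Int :=
    (PySem.List.enumerate symbols.toList 0).foldl
      (fun acc p => if p.2 == '|' then some p.1 else acc) none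
  match index1, index2 with
  | some i1, some i2 => i1 - i2
  | _, _ => 0   -- unreachable under Pre_ (Python raises UnboundLocalError here)

-- ===== PORT B =====
-- B: 'for i in range(n-1, -1, -1): if q(i): break' — first hit scanning from the end.
def pvBackScan (q : Nat → Bool) : Nat → Option Int
  | 0 => none
  | n + 1 => if q n then some ((n : Nat) : Int) else pvBackScan q n

def findDist_alt (word1 : String) (word2 : String) (symbols : String) : Int :=
  let index1 : Option Int :=
    pvBackScan (fun i => word1.toList.getD i 'a' == word2.toList.getD i 'b')
      (min word1.toList.length word2.toList.length)
  let index2 : Option Int :=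
    pvBackScan (fun i => symbols.toList.getD i ' ' == '|') symbols.toList.length
  -- index1 - index2; none is unreachable under Pre_ (Python raises UnboundLocalError there)
  (index1.bind (fun i1 => index2.map (fun i2 => i1 - i2))).getD 0

-- ===== PRECONDITION & SPEC =====
-- Pre_ excludes exactly the inputs where A raises UnboundLocalError: no position where the two
-- words agree (within the zip-truncated common length), or no '|' in symbols. B raises there too.
def Pre_findDist (word1 : String) (word2 : String) (symbols : String) : Prop :=
  ((word1.toList.zip word2.toList).any (fun p => p.1 == p.2)) = true ∧ '|' ∈ symbols.toList
instance (word1 : String) (word2 : String) (symbols : String) : Decidable (Pre_findDist word1 word2 symbols) := by unfold Pre_findDist; infer_instance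

def pvWitness_findDist : String × String × String := ("abc", "axc", "ab|c")

def Spec_findDist (word1 : String) (word2 : String) (symbols : String) (out : Int) : Prop := out = findDist_alt word1 word2 symbols
instance (word1 : String) (word2 : String) (symbols : String) (out : Int) : Decidable (Spec_findDist word1 word2 symbols out) := by unfold Spec_findDist; infer_instance

-- ===== CLAIM (what is proved, stated in full; the proofs are below) =====
def Claim_equal_findDist : Prop := ∀ (word1 : String) (word2 : String) (symbols : String), Dom_findDist word1 word2 symbols → Pre_findDist word1 word2 symbols → Spec_findDist word1 word2 symbols (findDist word1 word2 symbols)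

-- ===== LEMMAS AND PROOFS =====

-- A's last-match forward fold equals B's backward first-hit scan, for any predicate pair that
-- agrees on in-range indices.
theorem pvFold_eq_backScan {α : Type} (l : List α) (pr : α → Bool) (q : Nat → Bool)
    (h : ∀ (i : Nat) (hi : i < l.length), q i = pr l[i]) :
    (PySem.List.enumerate l 0).foldl (fun acc p => if pr p.2 then some p.1 else acc) none
      = pvBackScan q l.length := by
  induction l using List.reverseRecOn with
  | nil => simp [PySem.List.enumerate, pvBackScan]
  | append_singleton xs x ih =>
    have hx : q xs.length = pr x := by
      have := h xs.length (by simp)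
      simpa using this
    have hrest : ∀ (i : Nat) (hi : i < xs.length), q i = pr xs[i] := by
      intro i hi
      have := h i (by simp; omega)
      rwa [List.getElem_append_left hi] at this
    rw [PySem.List.enumerate_append]
    simp only [List.foldl_append, List.length_append, List.length_singleton]
    rw [ih hrest]
    simp [PySem.List.enumerate, pvBackScan, hx]

theorem pvWords_eq (w1 w2 : List Char) :
    (PySem.List.enumerate (w1.zip w2) 0).foldl (fun acc p => if p.2.1 == p.2.2 then some p.1 else acc) none
      = pvBackScan (fun i => w1.getD i 'a' == w2.getD i 'b') (min w1.length w2.length) := by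
  have hl : (w1.zip w2).length = min w1.length w2.length := List.length_zip
  rw [← hl]
  refine pvFold_eq_backScan (w1.zip w2) (fun c => c.1 == c.2) _ ?_
  intro i hi
  have h1 : i < w1.length := by rw [hl] at hi; omega
  have h2 : i < w2.length := by rw [hl] at hi; omega
  simp [List.getElem_zip, List.getD_eq_getElem?_getD, List.getElem?_eq_getElem h1,
    List.getElem?_eq_getElem h2]

theorem pvSym_eq (s : List Char) :
    (PySem.List.enumerate s 0).foldl (fun acc p => if p.2 == '|' then some p.1 else acc) none
      = pvBackScan (fun i => s.getD i ' ' == '|') s.length := by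
  refine pvFold_eq_backScan s (fun c => c == '|') _ ?_
  intro i hi
  simp [List.getD_eq_getElem?_getD, List.getElem?_eq_getElem hi]

-- ===== VERDICT (by name: the statement is the Claim_ definition above) =====
theorem findDist_spec : Claim_equal_findDist := by
  intro word1 word2 symbols _ _
  unfold Spec_findDist findDist findDist_alt
  rw [pvWords_eq, pvSym_eq]
  rcases pvBackScan (fun i => word1.toList.getD i 'a' == word2.toList.getD i 'b')
      (min word1.toList.length word2.toList.length) with _ | i1 <;>
    rcases pvBackScan (fun i => symbols.toList.getD i ' ' == '|') symbols.toList.length with _ | i2 <;>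
    rfl
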